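-- pv_equiv track=rewrite | github.com/ukmrs/vierkant | rothko.py | insert_bits
-- ===== SOURCE A (Python) =====
-- def binstrip(num: int):
--     return bin(num)[2:]  # equivalent to .lstrip("0x")
--
-- def insert_bits(original: int, bits: dict):
--     out = ""
--     shift = 0
--     for bl in binstrip(original).zfill(22):
--         while shift in bits:
--             out += bits[shift]
--             shift += 1
--         out += bl
--         shift += 1
--     while shift in bits:
--         out += bits[shift]
--         shift += 1
--     return out
-- ===== SOURCE B (Python) =====
-- def binstrip(num: int):
--     return bin(num)[2:]  # equivalent to .lstrip("0x")
--
-- def insert_bits(original: int, bits: dict):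
--     # Gap-splicing algorithm: sort the non-negative insertion positions, then
--     # splice whole slices of the padded binary string between consecutive used
--     # keys (a key k with j smaller used keys is used iff k - j <= len(s)),
--     # instead of probing the dict position by position.
--     s = binstrip(original).zfill(22)
--     n = len(s)
--     parts = []
--     prev = 0  # source characters consumed so far
--     for j, k in enumerate(sorted(k for k in bits if k >= 0)):
--         gap = k - j  # source characters that precede key k
--         if gap > n:
--             break
--         parts.append(s[prev:gap])
--         parts.append(bits[k])
--         prev = gap
--     parts.append(s[prev:])
--     return "".join(parts)
-- ===== Notes on version B (the rewrite author's own statement) =====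
-- stated objective: alternative
-- what changed: Replaces A's position-by-position dict probing (outer for-loop with inner/trailing drain while-loops) by a gap-splicing algorithm: sort the non-negative keys once, decide with the closed-form test k - j <= len(s) which keys are used, and splice whole slices of the padded binary string between consecutive used keys.
import Mathlib
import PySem

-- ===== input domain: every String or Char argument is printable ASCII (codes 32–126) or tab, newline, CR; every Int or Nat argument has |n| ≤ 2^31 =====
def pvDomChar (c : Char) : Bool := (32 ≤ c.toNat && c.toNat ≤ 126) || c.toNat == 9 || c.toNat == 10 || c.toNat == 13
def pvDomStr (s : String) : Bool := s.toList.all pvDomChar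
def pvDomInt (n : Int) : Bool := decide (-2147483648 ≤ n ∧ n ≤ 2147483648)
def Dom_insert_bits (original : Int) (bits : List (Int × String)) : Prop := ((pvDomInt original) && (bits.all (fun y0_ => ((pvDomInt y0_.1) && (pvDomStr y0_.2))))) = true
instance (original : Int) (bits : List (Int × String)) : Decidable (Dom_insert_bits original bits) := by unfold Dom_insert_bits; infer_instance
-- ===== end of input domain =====

-- B replaces A's position-by-position dict probing (for-loop plus drain while-loops) by a
-- gap-splicing algorithm over the sorted non-negative keys (objective: alternative, same cost).

-- termination helpers for A's drain loops (each while stops because shift strictly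
-- increases and the dict's key set is finite)
theorem pvFilterMono (l : List Int) (s : Int) :
    (l.filter (fun k => decide (s + 1 ≤ k))).length ≤ (l.filter (fun k => decide (s ≤ k))).length := by
  refine List.Sublist.length_le (List.monotone_filter_right l ?_)
  intro k hk
  simp only [decide_eq_true_eq] at *
  omega

theorem pvFilterLt (l : List Int) (s : Int) (h : s ∈ l) :
    (l.filter (fun k => decide (s + 1 ≤ k))).length < (l.filter (fun k => decide (s ≤ k))).length := by
  induction l with
  | nil => simp at h
  | cons x xs ih =>
    rw [List.filter_cons, List.filter_cons]
    rcases List.mem_cons.mp h with rfl | hx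
    · rw [decide_eq_false (by omega : ¬ (s + 1 ≤ s)), decide_eq_true (le_refl s),
        if_neg Bool.false_ne_true, if_pos rfl, List.length_cons]
      exact Nat.lt_succ_of_le (pvFilterMono xs s)
    · have ih' := ih hx
      by_cases h1 : s + 1 ≤ x
      · rw [decide_eq_true h1, decide_eq_true (by omega : s ≤ x), if_pos rfl, if_pos rfl,
          List.length_cons, List.length_cons]
        omega
      · rw [decide_eq_false h1, if_neg Bool.false_ne_true]
        by_cases h2 : s ≤ x
        · rw [decide_eq_true h2, if_pos rfl, List.length_cons]
          omega
        · rw [decide_eq_false h2, if_neg Bool.false_ne_true]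
          exact ih'

theorem pvMemKeys_of_get?_eq_some {d : PySem.Dict Int String} {s : Int} {v : String}
    (h : d.get? s = some v) : s ∈ d.keys := by
  by_contra hmem
  rw [(PySem.Dict.get?_eq_none_iff_not_mem_keys _ _).mpr hmem] at h
  simp at h

-- ===== PORT A =====
-- bin(num)[2:], exact: PySem.Int.pyBin is bin(n), slice from 2 is the [2:] slice
def binstrip (num : Int) : List Char :=
  PySem.Chars.slice (PySem.Int.pyBin num).toList (some 2) none

-- the inner/trailing `while shift in bits: out += bits[shift]; shift += 1`
def pyDrain (d : PySem.Dict Int String) (out : List Char) (shift : Int) : List Char × Int :=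
  match h : d.get? shift with
  | some v => pyDrain d (out ++ v.toList) (shift + 1)
  | none => (out, shift)
  termination_by (d.keys.filter (fun k => decide (shift ≤ k))).length
  decreasing_by exact pvFilterLt d.keys shift (pvMemKeys_of_get?_eq_some h)

-- out is the string accumulator (as code points); the for loop is a foldl over the chars
def insert_bits (original : Int) (bits : List (Int × String)) : String :=
  let d := PySem.Dict.ofList bits
  let st := (PySem.Chars.zfill (binstrip original) 22).foldl
      (fun (st : List Char × Int) bl =>
        let p := pyDrain d st.1 st.2
        (p.1 ++ [bl], p.2 + 1)) ([], 0)
  String.ofList (pyDrain d st.1 st.2).1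

-- ===== PORT B =====
-- Source B's for loop over enumerate(sorted nonneg keys), carrying prev and parts; an early
-- `break` is the first match arm.  bits[k] is d.get? k; k is always a key of d here, so the
-- getD default "" is never read (Python would raise KeyError only on a missing key).
def bLoop (d : PySem.Dict Int String) (s : List Char) (n : Int)
    (l : List (Int × Int)) (prev : Int) (parts : List String) : List String :=
  match l with
  | [] => parts ++ [String.ofList (PySem.Chars.slice s (some prev) none)]
  | (j, k) :: rest =>
    let gap := k - j
    if n < gap then parts ++ [String.ofList (PySem.Chars.slice s (some prev) none)]
    else bLoop d s n rest gap
      (parts ++ [String.ofList (PySem.Chars.slice s (some prev) (some gap)), (d.get? k).getD ""])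

def insert_bits_alt (original : Int) (bits : List (Int × String)) : String :=
  let d := PySem.Dict.ofList bits
  let s := PySem.Chars.zfill (binstrip original) 22
  let n : Int := s.length
  PySem.Str.join "" (bLoop d s n
    (PySem.List.enumerate (PySem.List.sorted (d.keys.filter (fun k => decide (0 ≤ k))) (fun x => x) false) 0)
    0 [])

-- ===== PRECONDITION & SPEC =====
def Spec_insert_bits (original : Int) (bits : List (Int × String)) (out : String) : Prop := out = insert_bits_alt original bits
instance (original : Int) (bits : List (Int × String)) (out : String) : Decidable (Spec_insert_bits original bits out) := by unfold Spec_insert_bits; infer_instance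

-- ===== CLAIM (what is proved, stated in full; the proofs are below) =====
def Claim_equal_insert_bits : Prop := ∀ (original : Int) (bits : List (Int × String)), Dom_insert_bits original bits → Spec_insert_bits original bits (insert_bits original bits)

-- ===== LEMMAS AND PROOFS =====

theorem pvInterNil (xs : List (List Char)) : ([] : List Char).intercalate xs = xs.flatten := by
  induction xs with
  | nil => simp [List.intercalate]
  | cons a as ih =>
    cases as with
    | nil => simp [List.intercalate]
    | cons b t =>
      simp only [List.intercalate, List.intersperse, List.flatten_cons] at *
      simp_all

-- canonical merged output from position shift with remaining source cs
def runFrom (d : PySem.Dict Int String) (cs : List Char) (shift : Int) : List Char :=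
  match h : d.get? shift with
  | some v => v.toList ++ runFrom d cs (shift + 1)
  | none =>
    match cs with
    | [] => []
    | c :: rest => c :: runFrom d rest (shift + 1)
  termination_by cs.length + (d.keys.filter (fun k => decide (shift ≤ k))).length
  decreasing_by
  · have := pvFilterLt d.keys shift (pvMemKeys_of_get?_eq_some h)
    omega
  · have := pvFilterMono d.keys shift
    simp only [List.length_cons]
    omega

-- shift value at which the drain loop stops
def dend (d : PySem.Dict Int String) (shift : Int) : Int :=
  match h : d.get? shift with
  | some _ => dend d (shift + 1)
  | none => shift
  termination_by (d.keys.filter (fun k => decide (shift ≤ k))).length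
  decreasing_by exact pvFilterLt d.keys shift (pvMemKeys_of_get?_eq_some h)

theorem runFrom_some {d : PySem.Dict Int String} {shift : Int} {v : String}
    (cs : List Char) (h : d.get? shift = some v) :
    runFrom d cs shift = v.toList ++ runFrom d cs (shift + 1) := by
  rw [runFrom.eq_def]; split <;> simp_all

theorem runFrom_none_nil {d : PySem.Dict Int String} {shift : Int}
    (h : d.get? shift = none) : runFrom d [] shift = [] := by
  rw [runFrom.eq_def]; split <;> simp_all

theorem runFrom_none_cons {d : PySem.Dict Int String} {shift : Int}
    (c : Char) (rest : List Char) (h : d.get? shift = none) :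
    runFrom d (c :: rest) shift = c :: runFrom d rest (shift + 1) := by
  rw [runFrom.eq_def]; split <;> simp_all

theorem dend_some {d : PySem.Dict Int String} {shift : Int} {v : String}
    (h : d.get? shift = some v) : dend d shift = dend d (shift + 1) := by
  rw [dend.eq_def]; split <;> simp_all

theorem dend_none {d : PySem.Dict Int String} {shift : Int}
    (h : d.get? shift = none) : dend d shift = shift := by
  rw [dend.eq_def]; split <;> simp_all

theorem pyDrain_spec (d : PySem.Dict Int String) (out : List Char) (shift : Int) :
    pyDrain d out shift = (out ++ runFrom d [] shift, dend d shift) := by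
  fun_induction pyDrain d out shift with
  | case1 out shift v h ih =>
    rw [runFrom_some [] h, dend_some h, ih]
    simp
  | case2 out shift h =>
    rw [runFrom_none_nil h, dend_none h]
    simp

theorem runFrom_cons (d : PySem.Dict Int String) (c : Char) (rest : List Char) (shift : Int) :
    runFrom d (c :: rest) shift =
      runFrom d [] shift ++ c :: runFrom d rest (dend d shift + 1) := by
  fun_induction dend d shift with
  | case1 shift v h ih =>
    rw [runFrom_some (c :: rest) h, ih, runFrom_some [] h]
    simp
  | case2 shift h =>
    rw [runFrom_none_cons c rest h, runFrom_none_nil h]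
    simp

theorem afold_spec (d : PySem.Dict Int String) (cs : List Char) (out : List Char) (shift : Int) :
    (pyDrain d (cs.foldl (fun (st : List Char × Int) bl =>
        let p := pyDrain d st.1 st.2
        (p.1 ++ [bl], p.2 + 1)) (out, shift)).1
      (cs.foldl (fun (st : List Char × Int) bl =>
        let p := pyDrain d st.1 st.2
        (p.1 ++ [bl], p.2 + 1)) (out, shift)).2).1
      = out ++ runFrom d cs shift := by
  induction cs generalizing out shift with
  | nil => simp [pyDrain_spec]
  | cons c rest ih =>
    rw [List.foldl_cons, ih, pyDrain_spec, runFrom_cons]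
    simp

-- when every key is outside [shift, shift + cs.length], the merge just copies the source
theorem runFrom_exhaust (d : PySem.Dict Int String) (cs : List Char) (shift : Int)
    (h : ∀ k ∈ d.keys, k < shift ∨ (shift + (cs.length : Int)) < k) :
    runFrom d cs shift = cs := by
  induction cs generalizing shift with
  | nil =>
    refine runFrom_none_nil ((PySem.Dict.get?_eq_none_iff_not_mem_keys _ _).mpr ?_)
    intro hm
    rcases h shift hm with h' | h' <;> simp at h' <;> omega
  | cons c rest ih =>
    have hnone : d.get? shift = none := by
      refine (PySem.Dict.get?_eq_none_iff_not_mem_keys _ _).mpr ?_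
      intro hm
      rcases h shift hm with h' | h' <;> simp at h' <;> omega
    rw [runFrom_none_cons c rest hnone, ih (shift + 1) ?_]
    intro k hk
    rcases h k hk with h' | h' <;> simp at h' ⊢ <;> omega

-- one key k0 ahead, no key in [shift, k0), enough source chars to reach it
theorem runFrom_key (d : PySem.Dict Int String) (v : String) :
    ∀ (g : Nat) (cs : List Char) (shift k0 : Int),
    d.get? k0 = some v → shift ≤ k0 → (∀ k ∈ d.keys, k < shift ∨ k0 ≤ k) →
    (k0 - shift).toNat = g → g ≤ cs.length →
    runFrom d cs shift = cs.take g ++ v.toList ++ runFrom d (cs.drop g) (k0 + 1) := by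
  intro g
  induction g with
  | zero =>
    intro cs shift k0 hv hle hgap hg hlen
    have hsk : shift = k0 := by omega
    subst hsk
    rw [runFrom_some cs hv]
    simp
  | succ g ih =>
    intro cs shift k0 hv hle hgap hg hlen
    have hnone : d.get? shift = none := by
      refine (PySem.Dict.get?_eq_none_iff_not_mem_keys _ _).mpr ?_
      intro hm
      rcases hgap shift hm with h' | h' <;> omega
    cases cs with
    | nil => simp at hlen
    | cons c rest =>
      rw [runFrom_none_cons c rest hnone,
        ih rest (shift + 1) k0 hv (by omega)
          (fun k hk => by rcases hgap k hk with h' | h' <;> omega)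
          (by omega) (by simpa using hlen)]
      simp

-- the loop invariant for B: l holds exactly the keys ≥ prev + j, strictly sorted
theorem bLoop_spec (d : PySem.Dict Int String) (s : List Char) (l : List Int)
    (j prev : Int) (parts : List String)
    (hp0 : 0 ≤ prev) (hpl : prev ≤ (s.length : Int)) (hj : 0 ≤ j)
    (hsort : l.Pairwise (· < ·))
    (hmem : ∀ k, k ∈ l ↔ (prev + j ≤ k ∧ k ∈ d.keys)) :
    (PySem.Str.join "" (bLoop d s (s.length : Int) (PySem.List.enumerate l j) prev parts)).toList
      = (PySem.Str.join "" parts).toList ++ runFrom d (s.drop prev.toNat) (prev + j) := by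
  have hdl : ((s.drop prev.toNat).length : Int) = (s.length : Int) - prev := by
    simp [List.length_drop]; omega
  induction l generalizing j prev parts with
  | nil =>
    rw [PySem.List.enumerate_nil, bLoop,
      runFrom_exhaust d _ (prev + j) (fun k hk => by
        have := (hmem k).not.mp (List.not_mem_nil (a := k))
        push Not at this
        left; exact lt_of_not_ge (fun hge => absurd hk (by simpa using this hge)))]
    simp [PySem.Str.toList_join, PySem.Chars.join, pvInterNil,
      PySem.Chars.slice_eq_listSlice, PySem.List.slice_from s hp0]
  | cons k0 rest ih =>
    have hk0 : prev + j ≤ k0 ∧ k0 ∈ d.keys := (hmem k0).mp (List.mem_cons_self)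
    obtain ⟨v, hv⟩ : ∃ v, d.get? k0 = some v := by
      cases hvv : d.get? k0 with
      | none => exact absurd ((PySem.Dict.get?_eq_none_iff_not_mem_keys _ _).mp hvv) (by simp [hk0.2])
      | some v => exact ⟨v, rfl⟩
    have hrest_gt : ∀ k ∈ rest, k0 < k := (List.pairwise_cons.mp hsort).1
    have hregion : ∀ k ∈ d.keys, k < prev + j ∨ k0 ≤ k := by
      intro k hk
      by_cases hge : prev + j ≤ k
      · rcases List.mem_cons.mp ((hmem k).mpr ⟨hge, hk⟩) with rfl | hr
        · right; omega
        · right; exact le_of_lt (hrest_gt k hr)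
      · left; omega
    rw [PySem.List.enumerate_cons, bLoop]
    by_cases hbr : (s.length : Int) < k0 - j
    · rw [if_pos hbr,
        runFrom_exhaust d _ (prev + j) (fun k hk => by
          rcases hregion k hk with h' | h'
          · left; exact h'
          · right; omega)]
      simp [PySem.Str.toList_join, PySem.Chars.join, pvInterNil,
        PySem.Chars.slice_eq_listSlice, PySem.List.slice_from s hp0]
    · rw [if_neg hbr]
      have hgap0 : 0 ≤ k0 - j := by omega
      have hgaple : k0 - j ≤ (s.length : Int) := by omega
      rw [ih (j + 1) (k0 - j)
        (parts ++ [String.ofList (PySem.Chars.slice s (some prev) (some (k0 - j))),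
          (d.get? k0).getD ""])
        hgap0 hgaple (by omega)
        (List.pairwise_cons.mp hsort).2
        (fun k => by
          constructor
          · intro hr
            exact ⟨by have := hrest_gt k hr; omega,
              ((hmem k).mp (List.mem_cons_of_mem _ hr)).2⟩
          · rintro ⟨hge, hk⟩
            rcases List.mem_cons.mp ((hmem k).mpr ⟨by omega, hk⟩) with rfl | hr
            · omega
            · exact hr)
        (by simp [List.length_drop]; omega),
        runFrom_key d v (k0 - (prev + j)).toNat (s.drop prev.toNat) (prev + j) k0 hv
          (by omega) hregion rfl (by omega)]
      have hdrop : (s.drop prev.toNat).drop (k0 - (prev + j)).toNat = s.drop (k0 - j).toNat := by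
        rw [List.drop_drop]
        congr 1
        omega
      have htake : PySem.Chars.slice s (some prev) (some (k0 - j))
          = (s.drop prev.toNat).take (k0 - (prev + j)).toNat := by
        rw [PySem.Chars.slice_eq_listSlice, PySem.List.slice_toNat _ hp0 hgap0]
        congr 1
        omega
      have hsh : k0 - j + (j + 1) = k0 + 1 := by ring
      rw [hdrop, htake, hv, hsh]
      simp [PySem.Str.toList_join, PySem.Chars.join, pvInterNil]

-- ===== VERDICT (by name: the statement is the Claim_ definition above) =====
set_option maxHeartbeats 1000000 in
theorem insert_bits_spec : Claim_equal_insert_bits := by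
  intro original bits _
  unfold Spec_insert_bits insert_bits insert_bits_alt
  apply String.toList_injective ?_
  have hnd : ((PySem.Dict.ofList bits).keys.filter (fun k => decide (0 ≤ k))).Nodup :=
    (PySem.Dict.nodup_keys_ofList bits).filter _
  have hsort : (PySem.List.sorted ((PySem.Dict.ofList bits).keys.filter (fun k => decide (0 ≤ k)))
      (fun x => x) false).Pairwise (· < ·) := by
    have h1 := PySem.List.sorted_pairwise (xs := (PySem.Dict.ofList bits).keys.filter
      (fun k => decide (0 ≤ k))) (key := fun x => x)
    have h2 := ((PySem.List.sorted_perm ((PySem.Dict.ofList bits).keys.filter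
      (fun k => decide (0 ≤ k))) (fun x => x) false).nodup_iff).mpr hnd
    exact (h1.and h2).imp (fun h => lt_of_le_of_ne h.1 h.2)
  have hmem : ∀ k, k ∈ PySem.List.sorted ((PySem.Dict.ofList bits).keys.filter
      (fun k => decide (0 ≤ k))) (fun x => x) false ↔
      ((0 : Int) + 0 ≤ k ∧ k ∈ (PySem.Dict.ofList bits).keys) := by
    intro k
    rw [PySem.List.mem_sorted, List.mem_filter]
    simp [and_comm]
  have hb := bLoop_spec (PySem.Dict.ofList bits)
    (PySem.Chars.zfill (binstrip original) 22)
    (PySem.List.sorted ((PySem.Dict.ofList bits).keys.filter (fun k => decide (0 ≤ k)))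
      (fun x => x) false)
    0 0 [] le_rfl (by exact_mod_cast Int.natCast_nonneg _) le_rfl hsort hmem
  have ha := afold_spec (PySem.Dict.ofList bits)
    (PySem.Chars.zfill (binstrip original) 22) [] 0
  simp at ha hb ⊢
  rw [ha, hb]
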